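-- pv_equiv track=rewrite | github.com/subindhar-techie/validation_suite | src/modules/mno_file_validator/core/simoda_validator.py | _find_iccid_line_number
-- ===== SOURCE A (Python) =====
-- from typing import List, Tuple, Optional, Callable
--
-- def _find_iccid_line_number(iccid: str, lines: List[str]) -> int:
--     """Find the line number where an ICCID might be present with formatting issues"""
--     variations = [
--         iccid,
--         f'"{iccid}"',
--         f"'{iccid}'",
--         iccid.replace('', ' ').strip(),
--     ]
--
--     for line_num, line in enumerate(lines, 1):
--         for variation in variations:
--             if variation in line:
--                 return line_num
--
--     # If not found, check for partial matches
--     for line_num, line in enumerate(lines, 1):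
--         if iccid[:10] in line:
--             return line_num
--
--     return 0
-- ===== SOURCE B (Python) =====
-- def _find_iccid_line_number(iccid, lines):
--     """Single pass: return first full-variation match immediately; keep the
--     first partial-match line as a fallback returned only after the scan."""
--     variations = (
--         iccid,
--         f'"{iccid}"',
--         f"'{iccid}'",
--         iccid.replace('', ' ').strip(),
--     )
--     partial = iccid[:10]
--     first_partial = 0
--     for line_num, line in enumerate(lines, 1):
--         if any(v in line for v in variations):
--             return line_num
--         if first_partial == 0 and partial in line:
--             first_partial = line_num
--     return first_partial
-- ===== Notes on version B (the rewrite author's own statement) =====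
-- stated objective: alternative
-- what changed: Replaced A's two sequential full scans (full-variation pass, then a separate partial-match pass) with a single pass over enumerate(lines, 1) that returns immediately on a full match and keeps the first partial-match line number in an accumulator returned as fallback.
import Mathlib
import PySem

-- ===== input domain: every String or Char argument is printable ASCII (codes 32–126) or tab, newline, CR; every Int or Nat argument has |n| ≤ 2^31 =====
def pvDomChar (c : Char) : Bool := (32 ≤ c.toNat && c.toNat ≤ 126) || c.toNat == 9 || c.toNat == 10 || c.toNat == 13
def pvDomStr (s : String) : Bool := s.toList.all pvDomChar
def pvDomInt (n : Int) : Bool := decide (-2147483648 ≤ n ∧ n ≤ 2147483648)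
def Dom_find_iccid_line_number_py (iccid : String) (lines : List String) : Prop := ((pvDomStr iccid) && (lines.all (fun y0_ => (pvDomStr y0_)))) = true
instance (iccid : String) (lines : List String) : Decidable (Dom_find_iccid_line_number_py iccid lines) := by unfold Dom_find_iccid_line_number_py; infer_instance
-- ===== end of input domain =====

-- ===== PORT A =====
-- B changes: one pass with a first-partial accumulator instead of A's two sequential scans; objective: alternative single-pass decomposition.
-- A's variations list (iccid, "iccid", 'iccid', iccid.replace('', ' ').strip())
def pvVariations (iccid : String) : List String :=
  [iccid, "\"" ++ iccid ++ "\"", "'" ++ iccid ++ "'",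
   PySem.Str.strip (PySem.Str.replace iccid "" " ")]

-- A's first loop: first line (1-based from n) containing any variation; none if no line does
def pvLoopFull (vars : List String) : List String → Int → Option Int
  | [], _ => none
  | l :: rest, n =>
    if vars.any (fun v => PySem.Str.isIn v l) then some n else pvLoopFull vars rest (n + 1)

-- A's second loop: first line containing iccid[:10]; none if no line does
def pvLoopPartial (p : String) : List String → Int → Option Int
  | [], _ => none
  | l :: rest, n =>
    if PySem.Str.isIn p l then some n else pvLoopPartial p rest (n + 1)

def find_iccid_line_number_py (iccid : String) (lines : List String) : Int :=
  match pvLoopFull (pvVariations iccid) lines 1 with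
  | some k => k
  | none =>
    match pvLoopPartial (PySem.Str.slice iccid none (some 10)) lines 1 with
    | some k => k
    | none => 0

-- ===== PORT B =====
-- B's single loop: return n at the first full match, else carry the first partial-match line in fp
def pvLoopB (vars : List String) (p : String) : List String → Int → Int → Int
  | [], _, fp => fp
  | l :: rest, n, fp =>
    if vars.any (fun v => PySem.Str.isIn v l) then n
    else pvLoopB vars p rest (n + 1) (if fp = 0 ∧ PySem.Str.isIn p l then n else fp)

def find_iccid_line_number_py_alt (iccid : String) (lines : List String) : Int :=
  pvLoopB (pvVariations iccid) (PySem.Str.slice iccid none (some 10)) lines 1 0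

-- ===== PRECONDITION & SPEC =====
def Spec_find_iccid_line_number_py (iccid : String) (lines : List String) (out : Int) : Prop := out = find_iccid_line_number_py_alt iccid lines
instance (iccid : String) (lines : List String) (out : Int) : Decidable (Spec_find_iccid_line_number_py iccid lines out) := by unfold Spec_find_iccid_line_number_py; infer_instance

-- ===== CLAIM (what is proved, stated in full; the proofs are below) =====
def Claim_equal_find_iccid_line_number_py : Prop := ∀ (iccid : String) (lines : List String), Dom_find_iccid_line_number_py iccid lines → Spec_find_iccid_line_number_py iccid lines (find_iccid_line_number_py iccid lines)

-- ===== LEMMAS AND PROOFS =====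
-- Invariant relating B's single pass to A's two loops, for any positive start index n.
theorem pvLoopB_eq (vars : List String) (p : String) (lines : List String) :
    ∀ (n fp : Int), 0 < n →
      pvLoopB vars p lines n fp =
        match pvLoopFull vars lines n with
        | some k => k
        | none =>
          if fp = 0 then
            match pvLoopPartial p lines n with
            | some k => k
            | none => 0
          else fp := by
  induction lines with
  | nil => intro n fp _; simp [pvLoopB, pvLoopFull, pvLoopPartial]
  | cons l rest ih =>
    intro n fp hn
    by_cases hfull : vars.any (fun v => PySem.Str.isIn v l) = true
    · have h1 : ∃ x ∈ vars, PySem.Chars.isIn x.toList l.toList = true := by simpa using hfull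
      simp [pvLoopB, pvLoopFull, h1]
    · have h1 : ¬ ∃ x ∈ vars, PySem.Chars.isIn x.toList l.toList = true := by simpa using hfull
      simp only [pvLoopB, pvLoopFull, pvLoopPartial, List.any_eq_true, PySem.Str.isIn_eq,
        h1, if_false]
      rw [ih (n + 1) _ (by omega)]
      by_cases hpart : PySem.Chars.isIn p.toList l.toList = true
      · by_cases hfp : fp = 0
        · simp only [hfp, hpart, and_true, if_true]
          cases pvLoopFull vars rest (n + 1) with
          | some k => simp
          | none => simp [show ¬ n = 0 by omega]
        · simp [hfp, hpart]
      · simp [hpart]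

-- ===== VERDICT (by name: the statement is the Claim_ definition above) =====
theorem find_iccid_line_number_py_spec : Claim_equal_find_iccid_line_number_py := by
  intro iccid lines _
  unfold Spec_find_iccid_line_number_py find_iccid_line_number_py find_iccid_line_number_py_alt
  rw [pvLoopB_eq _ _ _ 1 0 (by omega)]
  simp
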